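-- pv_equiv track=rewrite | github.com/jorgerankov/TDA | Talleres/Talleres Backtracking, PD, Greedy/borrar.py | borrar
-- ===== SOURCE A (Python) =====
-- def borrar(cant_letras, palabra) -> int:
--     if cant_letras != len(palabra) :
--         return -1;
--
--     memo = {}
--
--     def dp(l,r):
--         if l > r: return 0;         # Si me quede sin letras
--         if l == r: return 1;        # Si l y r son el mismo indice (un solo caracter)
--
--         if (l, r) in memo:          # Chequeo si el par existe en mi memoria
--             return memo[(l, r)]     # Si existe, lo retorno
--
--         res = 1 + dp(l+1, r)        # Sino, borro el caracter en la pos l y resuelvo recursivamente el resto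
--
--         for k in range (l+1, r+1):
--             if palabra[k] == palabra[l]:                    # Busco posiciones donde la letra k sea igual a l
--                 res = min(res, dp(l+1, k-1) + dp(k,r))      # Si la hay, intento borrar lo de en medio,
--                                                             # para juntar palabra[l] y palabra[k]
--         memo[(l, r)] = res                                  # Guardo el menor costo en mi memo
--         return res                                          # Devuelvo el costo
--
--     return dp(0, len(palabra)-1)                            # Llamo recursivamente a toda la palabra
-- ===== SOURCE B (Python) =====
-- def borrar(cant_letras, palabra) -> int:
--     if cant_letras != len(palabra):
--         return -1
--     n = len(palabra)
--     if n == 0: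
--         return 0
--     dp = {}
--     def get(l, r):
--         return dp[(l, r)] if l <= r else 0
--     for l in range(n):
--         dp[(l, l)] = 1
--     for length in range(1, n):
--         for l in range(0, n - length):
--             r = l + length
--             best = 1 + get(l + 1, r)
--             for k in range(l + 1, r + 1):
--                 if palabra[k] == palabra[l]:
--                     best = min(best, get(l + 1, k - 1) + get(k, r))
--             dp[(l, r)] = best
--     return dp[(0, n - 1)]
-- ===== Notes on version B (the rewrite author's own statement) =====
-- stated objective: alternative
-- what changed: Replaced the memoized top-down recursion by an iterative bottom-up interval DP: a table filled by increasing interval length with explicit loops, no recursion and no memo-hit checks.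
import Mathlib
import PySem

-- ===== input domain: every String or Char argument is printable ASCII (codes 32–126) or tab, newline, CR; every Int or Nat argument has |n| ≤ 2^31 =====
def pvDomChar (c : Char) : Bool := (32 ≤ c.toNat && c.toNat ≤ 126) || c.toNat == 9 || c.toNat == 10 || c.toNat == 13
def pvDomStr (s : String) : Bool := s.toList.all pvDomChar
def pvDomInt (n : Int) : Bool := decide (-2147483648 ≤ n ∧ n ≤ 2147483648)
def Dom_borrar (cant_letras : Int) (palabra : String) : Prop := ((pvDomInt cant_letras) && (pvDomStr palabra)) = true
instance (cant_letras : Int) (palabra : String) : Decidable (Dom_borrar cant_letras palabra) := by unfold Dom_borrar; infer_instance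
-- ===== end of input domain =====

-- B replaces A's memoized top-down recursion by an iterative bottom-up interval-DP table
-- filled by increasing interval length (objective: alternative decomposition, same asymptotic cost).


-- ===== PORT A =====
-- A's dp(l, r): the memo dict only speeds the recursion up (it never changes a value), so the
-- port is the bare recursion; the fuel argument only makes it total (fuel > r - l on every call).
def borrarDp (palabra : String) : Nat → Int → Int → Int
  | 0, l, r => if l > r then 0 else if l = r then 1 else 0
  | fuel+1, l, r =>
    if l > r then 0
    else if l = r then 1
    else
      (PySem.List.pyRange (l+1) (r+1) 1).foldl
        (fun res k =>
          if PySem.Str.pyGet? palabra k = PySem.Str.pyGet? palabra l then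
            min res (borrarDp palabra fuel (l+1) (k-1) + borrarDp palabra fuel k r)
          else res)
        (1 + borrarDp palabra fuel (l+1) r)

def borrar (cant_letras : Int) (palabra : String) : Int :=
  if cant_letras ≠ PySem.Str.len palabra then -1
  else borrarDp palabra palabra.toList.length 0 (PySem.Str.len palabra - 1)

-- ===== PORT B =====
-- B's get(l, r): dp[(l, r)] for l ≤ r, else 0.  The Python dict lookup dp[(l,r)] is ported as
-- getD _ 0, exact because the key is always present when B reads it (proved by the invariant below).
def borrarAltGet (dp : PySem.Dict (Int × Int) Int) (l r : Int) : Int :=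
  if l ≤ r then dp.getD (l, r) 0 else 0

def borrar_alt (cant_letras : Int) (palabra : String) : Int :=
  if cant_letras ≠ PySem.Str.len palabra then -1
  else
    let n := PySem.Str.len palabra
    if n = 0 then 0
    else
      let dp0 := (PySem.List.pyRange 0 n 1).foldl (fun d l => d.insert (l, l) 1) PySem.Dict.empty
      let dp := (PySem.List.pyRange 1 n 1).foldl (fun d length =>
        (PySem.List.pyRange 0 (n - length) 1).foldl (fun d l =>
          let r := l + length
          let best := (PySem.List.pyRange (l+1) (r+1) 1).foldl (fun best k =>
            if PySem.Str.pyGet? palabra k = PySem.Str.pyGet? palabra l then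
              min best (borrarAltGet d (l+1) (k-1) + borrarAltGet d k r)
            else best)
            (1 + borrarAltGet d (l+1) r)
          d.insert (l, r) best) d) dp0
      borrarAltGet dp 0 (n-1)

-- ===== PRECONDITION & SPEC =====
def Spec_borrar (cant_letras : Int) (palabra : String) (out : Int) : Prop := out = borrar_alt cant_letras palabra
instance (cant_letras : Int) (palabra : String) (out : Int) : Decidable (Spec_borrar cant_letras palabra out) := by unfold Spec_borrar; infer_instance

-- ===== CLAIM (what is proved, stated in full; the proofs are below) =====
def Claim_equal_borrar : Prop := ∀ (cant_letras : Int) (palabra : String), Dom_borrar cant_letras palabra → Spec_borrar cant_letras palabra (borrar cant_letras palabra)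

-- ===== LEMMAS AND PROOFS =====

-- The dp value is independent of the fuel, as long as fuel > r - l.
theorem borrarDp_succ (p : String) (f : Nat) (l r : Int) :
    borrarDp p (f+1) l r =
      (if l > r then 0
       else if l = r then 1
       else
        (PySem.List.pyRange (l+1) (r+1) 1).foldl
          (fun res k =>
            if PySem.Str.pyGet? p k = PySem.Str.pyGet? p l then
              min res (borrarDp p f (l+1) (k-1) + borrarDp p f k r)
            else res)
          (1 + borrarDp p f (l+1) r)) := rfl

theorem borrarDp_fuel (p : String) : ∀ (fuel fuel' : Nat) (l r : Int),
    (r - l).toNat < fuel → (r - l).toNat < fuel' →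
    borrarDp p fuel l r = borrarDp p fuel' l r := by
  intro fuel
  induction fuel with
  | zero => intro fuel' l r h _; omega
  | succ f ih =>
    intro fuel' l r h h'
    match fuel', h' with
    | f'+1, h' =>
      rw [borrarDp_succ, borrarDp_succ]
      by_cases hlr : l > r
      · simp [hlr]
      · by_cases heq : l = r
        · simp [heq]
        · simp only [if_neg hlr, if_neg heq]
          rw [ih f' (l+1) r (by omega) (by omega)]
          apply PySem.List.foldl_congr_mem
          intro acc k hk
          rw [PySem.List.mem_pyRange_one] at hk
          rw [ih f' (l+1) (k-1) (by omega) (by omega), ih f' k r (by omega) (by omega)]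

-- canonical value of A's dp(l, r)
def borrarG (p : String) (l r : Int) : Int := borrarDp p ((r - l).toNat + 1) l r

theorem borrarG_gt (p : String) {l r : Int} (h : r < l) : borrarG p l r = 0 := by
  simp [borrarG, borrarDp, h]

theorem borrarG_diag (p : String) (l : Int) : borrarG p l l = 1 := by
  simp [borrarG, borrarDp]

theorem borrarG_rec (p : String) {l r : Int} (h : l < r) :
    borrarG p l r = (PySem.List.pyRange (l+1) (r+1) 1).foldl
      (fun res k =>
        if PySem.Str.pyGet? p k = PySem.Str.pyGet? p l then
          min res (borrarG p (l+1) (k-1) + borrarG p k r)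
        else res)
      (1 + borrarG p (l+1) r) := by
  have hf : (r - l).toNat + 1 = ((r - l).toNat - 1) + 1 + 1 := by omega
  rw [borrarG, hf, borrarDp_succ]
  rw [if_neg (show ¬ l > r by omega), if_neg (show ¬ l = r by omega)]
  rw [borrarDp_fuel p ((r - l).toNat - 1 + 1) ((r - (l+1)).toNat + 1) (l+1) r (by omega) (by omega)]
  apply PySem.List.foldl_congr_mem
  intro acc k hk
  rw [PySem.List.mem_pyRange_one] at hk
  rw [borrarDp_fuel p ((r - l).toNat - 1 + 1) ((k - 1 - (l+1)).toNat + 1) (l+1) (k-1) (by omega) (by omega),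
      borrarDp_fuel p ((r - l).toNat - 1 + 1) ((r - k).toNat + 1) k r (by omega) (by omega)]
  rfl

-- B's table invariant: after all lengths up to L are filled, every interval of gap ≤ L is stored
def BInv (p : String) (d : PySem.Dict (Int × Int) Int) (L : Int) : Prop :=
  ∀ l r : Int, 0 ≤ l → l ≤ r → r < PySem.Str.len p → r - l ≤ L →
    d.get? (l, r) = some (borrarG p l r)

-- the diagonal-seeding loop, characterised
theorem borrar_diag_get? (xs : List Int) (d : PySem.Dict (Int × Int) Int) (a b : Int) :
    (xs.foldl (fun d l => d.insert (l, l) (1 : Int)) d).get? (a, b)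
      = if a = b ∧ a ∈ xs then some 1 else d.get? (a, b) := by
  induction xs generalizing d with
  | nil => simp
  | cons x xs ih =>
    simp only [List.foldl_cons, ih, PySem.Dict.get?_insert, List.mem_cons, Prod.mk.injEq]
    by_cases hab : a = b
    · subst hab
      by_cases hmem : a ∈ xs
      · simp [hmem]
      · by_cases hx : a = x <;> simp [hmem, hx]
    · have hxx : ¬ (a = x ∧ b = x) := by rintro ⟨rfl, rfl⟩; exact hab rfl
      simp [hab, hxx]

-- the value B computes for the cell (x, x+length) equals A's dp there
theorem borrar_step_value (p : String) (d : PySem.Dict (Int × Int) Int) (length x : Int)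
    (hInv : BInv p d (length - 1)) (h1 : 1 ≤ length) (h0 : 0 ≤ x)
    (h2 : x + length < PySem.Str.len p) :
    (PySem.List.pyRange (x+1) (x+length+1) 1).foldl
      (fun best k =>
        if PySem.Str.pyGet? p k = PySem.Str.pyGet? p x then
          min best (borrarAltGet d (x+1) (k-1) + borrarAltGet d k (x+length))
        else best)
      (1 + borrarAltGet d (x+1) (x+length))
    = borrarG p x (x+length) := by
  have hget : ∀ a b : Int, 0 ≤ a → b ≤ x + length → b - a ≤ length - 1 →
      borrarAltGet d a b = borrarG p a b := by
    intro a b ha hb hgap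
    unfold borrarAltGet
    by_cases hab : a ≤ b
    · rw [if_pos hab]
      exact PySem.Dict.getD_of_get?_eq_some d 0 (hInv a b ha hab (by omega) hgap)
    · rw [if_neg hab, borrarG_gt p (by omega)]
  rw [borrarG_rec p (show x < x + length by omega)]
  rw [hget (x+1) (x+length) (by omega) (by omega) (by omega)]
  apply PySem.List.foldl_congr_mem
  intro acc k hk
  rw [PySem.List.mem_pyRange_one] at hk
  rw [hget (x+1) (k-1) (by omega) (by omega) (by omega),
      hget k (x+length) (by omega) (by omega) (by omega)]

-- the inner (over l) loop of B, characterised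
theorem borrar_inner_get? (p : String) (length : Int) (h1 : 1 ≤ length) :
    ∀ (xs : List Int) (d : PySem.Dict (Int × Int) Int),
    BInv p d (length - 1) →
    (∀ x ∈ xs, 0 ≤ x ∧ x + length < PySem.Str.len p) →
    ∀ a b : Int,
    ((xs.foldl (fun d l =>
        d.insert (l, l + length)
          ((PySem.List.pyRange (l+1) (l+length+1) 1).foldl
            (fun best k =>
              if PySem.Str.pyGet? p k = PySem.Str.pyGet? p l then
                min best (borrarAltGet d (l+1) (k-1) + borrarAltGet d k (l+length))
              else best)
            (1 + borrarAltGet d (l+1) (l+length)))) d).get? (a, b))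
      = if b = a + length ∧ a ∈ xs then some (borrarG p a b) else d.get? (a, b) := by
  intro xs
  induction xs with
  | nil => intro d _ _ a b; simp
  | cons x xs ih =>
    intro d hInv hxs a b
    have hx := hxs x (List.mem_cons_self)
    have hbx := borrar_step_value p d length x hInv h1 hx.1 hx.2
    have hInv' : BInv p (d.insert (x, x + length)
        ((PySem.List.pyRange (x+1) (x+length+1) 1).foldl
          (fun best k =>
            if PySem.Str.pyGet? p k = PySem.Str.pyGet? p x then
              min best (borrarAltGet d (x+1) (k-1) + borrarAltGet d k (x+length))
            else best)
          (1 + borrarAltGet d (x+1) (x+length)))) (length - 1) := by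
      intro l r hl hlr hr hgap
      rw [PySem.Dict.get?_insert_of_ne]
      · exact hInv l r hl hlr hr hgap
      · intro hc
        have : l = x ∧ r = x + length := by simpa [Prod.ext_iff] using hc
        omega
    simp only [List.foldl_cons]
    rw [ih _ hInv' (fun y hy => hxs y (List.mem_cons_of_mem _ hy))]
    rw [PySem.Dict.get?_insert]
    by_cases hR : b = a + length ∧ a ∈ xs
    · simp [hR]
    · by_cases hax : (a, b) = (x, x + length)
      · have hab : a = x ∧ b = x + length := by simpa [Prod.ext_iff] using hax
        obtain ⟨rfl, rfl⟩ := hab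
        rw [if_neg hR, if_pos rfl, hbx, if_pos ⟨rfl, List.mem_cons_self⟩]
      · have : ¬ (b = a + length ∧ (a = x ∨ a ∈ xs)) := by
          rintro ⟨hba, hc | hc⟩
          · exact hax (by simp [hc, hba])
          · exact hR ⟨hba, hc⟩
        simp [hR, hax, this]

-- abbreviations for B's two folds (proof-side names for the terms inside borrar_alt)
def borrarDiag (p : String) : PySem.Dict (Int × Int) Int :=
  (PySem.List.pyRange 0 (PySem.Str.len p) 1).foldl (fun d l => d.insert (l, l) 1) PySem.Dict.empty

def borrarFill (p : String) (d : PySem.Dict (Int × Int) Int) (length : Int) :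
    PySem.Dict (Int × Int) Int :=
  (PySem.List.pyRange 0 (PySem.Str.len p - length) 1).foldl (fun d l =>
    d.insert (l, l + length)
      ((PySem.List.pyRange (l+1) (l+length+1) 1).foldl
        (fun best k =>
          if PySem.Str.pyGet? p k = PySem.Str.pyGet? p l then
            min best (borrarAltGet d (l+1) (k-1) + borrarAltGet d k (l+length))
          else best)
        (1 + borrarAltGet d (l+1) (l+length)))) d

theorem borrar_outer_inv (p : String) : ∀ (t : Nat), (t : Int) + 1 ≤ PySem.Str.len p →
    BInv p ((PySem.List.pyRange 1 ((t : Int) + 1) 1).foldl (borrarFill p) (borrarDiag p)) (t : Int) := by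
  intro t
  induction t with
  | zero =>
    intro _ l r hl hlr hr hgap
    have hlr' : l = r := by omega
    rw [PySem.List.pyRange_one_eq_nil (by omega)]
    simp only [List.foldl_nil, borrarDiag]
    rw [borrar_diag_get?, if_pos ⟨hlr', by rw [PySem.List.mem_pyRange_one]; omega⟩,
        hlr', borrarG_diag]
  | succ t ih =>
    intro hn
    have hcast : ((t + 1 : Nat) : Int) + 1 = ((t : Int) + 1) + 1 := by push_cast; ring
    rw [hcast, PySem.List.pyRange_one_succ_right (by omega), List.foldl_append]
    intro l r hl hlr hr hgap
    have hprev := ih (by push_cast at hn ⊢; omega)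
    simp only [List.foldl_cons, List.foldl_nil]
    rw [show borrarFill p ((PySem.List.pyRange 1 ((t : Int) + 1) 1).foldl (borrarFill p) (borrarDiag p)) ((t : Int) + 1)
        = _ from rfl]
    unfold borrarFill
    rw [borrar_inner_get? p ((t : Int) + 1) (by omega) _ _
        (by intro l' r' h1 h2 h3 h4; exact hprev l' r' h1 h2 h3 (by omega))
        (by intro y hy; rw [PySem.List.mem_pyRange_one] at hy; constructor <;> omega)]
    push_cast at hn hgap
    by_cases hcase : r - l = (t : Int) + 1
    · rw [if_pos ⟨by omega, by rw [PySem.List.mem_pyRange_one]; omega⟩]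
    · rw [if_neg (by rintro ⟨hc, _⟩; omega)]
      exact hprev l r hl hlr hr (by omega)

-- ===== VERDICT (by name: the statement is the Claim_ definition above) =====
theorem borrar_spec : Claim_equal_borrar := by
  intro cant_letras palabra _
  unfold Spec_borrar borrar borrar_alt
  have hlen : PySem.Str.len palabra = (palabra.toList.length : Int) := PySem.Str.len_eq palabra
  by_cases hc : cant_letras = PySem.Str.len palabra
  · rw [if_neg (not_not_intro hc), if_neg (not_not_intro hc)]
    by_cases hn : PySem.Str.len palabra = 0
    · rw [if_pos hn]
      have h0 : palabra.toList.length = 0 := by omega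
      rw [h0, hn]
      norm_num [borrarDp]
    · rw [if_neg hn]
      have hpos : 1 ≤ PySem.Str.len palabra := by omega
      have ht : ((PySem.Str.len palabra - 1).toNat : Int) + 1 = PySem.Str.len palabra := by omega
      have hfin := borrar_outer_inv palabra (PySem.Str.len palabra - 1).toNat (by omega)
      rw [ht] at hfin
      have hget := hfin 0 (PySem.Str.len palabra - 1) (by omega) (by omega) (by omega) (by omega)
      have halt : borrarAltGet
          ((PySem.List.pyRange 1 (PySem.Str.len palabra) 1).foldl (borrarFill palabra) (borrarDiag palabra))
          0 (PySem.Str.len palabra - 1) = borrarG palabra 0 (PySem.Str.len palabra - 1) := by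
        unfold borrarAltGet
        rw [if_pos (by omega), PySem.Dict.getD_of_get?_eq_some _ 0 hget]
      calc borrarDp palabra palabra.toList.length 0 (PySem.Str.len palabra - 1)
          = borrarG palabra 0 (PySem.Str.len palabra - 1) := by
            apply borrarDp_fuel <;> omega
        _ = _ := by rw [← halt]; rfl
  · rw [if_pos hc, if_pos hc]
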